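-- pv_equiv track=rewrite | github.com/AvrilMZ/Teoria_de_Algoritmos | TP2/src/solucion.py | rec_oleada
-- ===== SOURCE A (Python) =====
-- ATACAR = "Atacar"
--
-- CARGAR = "Cargar"
--
-- def crear_m_oleada(enemigos: list[int], calcular_muertos: list[int]):
-- 	M = [0] * (len(enemigos) + 1)
-- 	prev = [0] * (len(enemigos) + 1)
-- 	for ultima_oleada in range(1, len(enemigos) + 1):
-- 		maximo = min(calcular_muertos[ultima_oleada - 1], enemigos[ultima_oleada - 1])
-- 		prev[ultima_oleada] = 0
-- 		for ultimo_ataque in range(1, ultima_oleada):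
-- 			muertos = M[ultimo_ataque] + min(calcular_muertos[(ultima_oleada - ultimo_ataque) - 1], enemigos[ultima_oleada - 1])
-- 			if muertos > maximo:
-- 				maximo = muertos
-- 				prev[ultima_oleada] = ultimo_ataque # Guardo cuando ataque
-- 		M[ultima_oleada] = maximo
-- 	return M, prev
--
-- def rec_oleada(enemigos: list[int], calcular_muertos: list[int]):
-- 	M, prev = crear_m_oleada(enemigos, calcular_muertos)
--
-- 	oleada_actual = len(enemigos)
-- 	acciones = []
--
-- 	while oleada_actual > 0:
-- 		ultimo_ataque = prev[oleada_actual]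
--
-- 		num_cargas = oleada_actual - ultimo_ataque - 1 # Cantidad de cargas necesarias antes de atacar
-- 		if num_cargas < 0:
-- 			num_cargas = 0
--
-- 		acciones.append(ATACAR)
-- 		for _ in range(num_cargas):
-- 			acciones.append(CARGAR)
--
-- 		oleada_actual = ultimo_ataque
--
-- 	acciones.reverse()
-- 	return acciones, M[len(enemigos)]
-- ===== SOURCE B (Python) =====
-- ATACAR = "Atacar"
--
-- CARGAR = "Cargar"
--
-- def rec_oleada(enemigos, calcular_muertos):
--     n = len(enemigos)
--     memo = {}
--
--     def mejor(i):
--         # best kills achievable on the first i waves, and the wave after which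
--         # the previous attack happened (0 = the whole span is one charge-up).
--         if i == 0:
--             return (0, 0)
--         if i in memo:
--             return memo[i]
--         best = min(calcular_muertos[i - 1], enemigos[i - 1])
--         best_k = 0
--         for k in range(1, i):
--             v = mejor(k)[0] + min(calcular_muertos[i - k - 1], enemigos[i - 1])
--             if v > best:
--                 best = v
--                 best_k = k
--         memo[i] = (best, best_k)
--         return memo[i]
--
--     for i in range(1, n + 1):  # warm the memo bottom-up so recursion stays shallow
--         mejor(i)
--     total = mejor(n)[0]
--
--     acciones = []
--     i = n
--     while i > 0:
--         k = mejor(i)[1]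
--         cargas = max(i - k - 1, 0)
--         acciones = [CARGAR] * cargas + [ATACAR] + acciones
--         i = k
--     return acciones, total
-- ===== Notes on version B (the rewrite author's own statement) =====
-- stated objective: alternative
-- what changed: Replaces the bottom-up M/prev table loops with a memoized recursive mejor(i) returning (best_kills, split_point), warmed bottom-up so the recursion stays shallow, and rebuilds the action list chronologically by prepending Cargar-blocks, eliminating the final reverse.
import Mathlib
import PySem

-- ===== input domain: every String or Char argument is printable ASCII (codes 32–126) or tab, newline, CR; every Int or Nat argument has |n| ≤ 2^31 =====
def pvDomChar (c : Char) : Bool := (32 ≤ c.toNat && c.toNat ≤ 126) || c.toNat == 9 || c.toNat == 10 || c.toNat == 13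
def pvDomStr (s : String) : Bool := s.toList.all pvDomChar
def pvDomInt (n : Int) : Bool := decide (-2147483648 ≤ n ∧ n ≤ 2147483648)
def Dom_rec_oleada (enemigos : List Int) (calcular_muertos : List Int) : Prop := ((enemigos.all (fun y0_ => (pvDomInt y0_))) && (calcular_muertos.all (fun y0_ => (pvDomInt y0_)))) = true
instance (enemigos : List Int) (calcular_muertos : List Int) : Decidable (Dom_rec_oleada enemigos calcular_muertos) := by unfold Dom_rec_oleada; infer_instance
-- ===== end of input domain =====

-- B replaces A's bottom-up table loops by a memoized recursive `mejor` (warmed bottom-up so the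
-- Python recursion stays shallow) and rebuilds the action list front-to-back by prepending blocks,
-- so the final `reverse` disappears; objective: alternative decomposition, same values.

-- ===== PORT A =====
-- crear_m_oleada: the two in-place lists M, prev become a pair of lists threaded through a foldl
-- over range(1, n+1); list reads/writes are in range on Pre_, so ported with getD/set.
-- body of the outer `for ultima_oleada in range(1, len(enemigos) + 1)` loop
def stepA (e cm : List Int) (Mp : List Int × List Int) (i : Nat) : List Int × List Int :=
  let st := (List.range' 1 (i - 1)).foldl
    (fun (mp : Int × Int) k =>
      let muertos := Mp.1.getD k 0 + min (cm.getD (i - k - 1) 0) (e.getD (i - 1) 0)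
      if muertos > mp.1 then (muertos, (k : Int)) else mp)
    (min (cm.getD (i - 1) 0) (e.getD (i - 1) 0), 0)
  (Mp.1.set i st.1, Mp.2.set i st.2)

def crearA (e cm : List Int) : List Int × List Int :=
  let n := e.length
  (List.range' 1 n).foldl (stepA e cm) (List.replicate (n + 1) 0, List.replicate (n + 1) 0)

-- the while-loop appending "Atacar"/"Cargar"; fuel = number of waves bounds the iterations
-- (oleada_actual strictly decreases), it only makes the recursion total.
def buildA (prev : List Int) : Nat → Int → List String → List String
  | 0, _, acc => acc
  | fuel + 1, i, acc =>
    if i > 0 then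
      let k := prev.getD i.toNat 0
      let nc := i - k - 1
      let nc := if nc < 0 then 0 else nc
      buildA prev fuel k (acc ++ "Atacar" :: List.replicate nc.toNat "Cargar")
    else acc

def rec_oleada (enemigos : List Int) (calcular_muertos : List Int) : List String × Int :=
  let Mp := crearA enemigos calcular_muertos
  let acc := buildA Mp.2 enemigos.length (enemigos.length : Int) []
  (acc.reverse, Mp.1.getD enemigos.length 0)

-- ===== PORT B =====
-- Source B's `mejor(i)` with its memo dict threaded explicitly (Python mutates the closed-over dict);
-- the inner `for k in range(1, i)` is the foldl over (range' 1 i).attach (attach only for termination).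
def mejorB (e cm : List Int) : Nat → PySem.Dict Int (Int × Int) → (Int × Int) × PySem.Dict Int (Int × Int)
  | 0, memo => ((0, 0), memo)
  | i + 1, memo =>
    match memo.get? ((i : Int) + 1) with
    | some v => (v, memo)
    | none =>
      let st := (List.range' 1 i).attach.foldl
        (fun (st : (Int × Int) × PySem.Dict Int (Int × Int)) k =>
          (if (mejorB e cm k.1 st.2).1.1 + min (cm.getD (i - k.1) 0) (e.getD i 0) > st.1.1
           then ((mejorB e cm k.1 st.2).1.1 + min (cm.getD (i - k.1) 0) (e.getD i 0), (k.1 : Int))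
           else st.1,
           (mejorB e cm k.1 st.2).2))
        ((min (cm.getD i 0) (e.getD i 0), 0), memo)
      (st.1, st.2.insert ((i : Int) + 1) st.1)
termination_by i => i
decreasing_by have := (List.mem_range'_1.1 k.2).2; omega

-- Source B's while loop prepending ["Cargar"]*cargas + ["Atacar"]; fuel only makes it total.
def buildB (e cm : List Int) (memo : PySem.Dict Int (Int × Int)) : Nat → Int → List String → List String
  | 0, _, acc => acc
  | fuel + 1, i, acc =>
    if i > 0 then
      let k := (mejorB e cm i.toNat memo).1.2
      let cargas := max (i - k - 1) 0
      buildB e cm memo fuel k (List.replicate cargas.toNat "Cargar" ++ "Atacar" :: acc)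
    else acc

def rec_oleada_alt (enemigos : List Int) (calcular_muertos : List Int) : List String × Int :=
  let n := enemigos.length
  let memo := (List.range' 1 n).foldl
    (fun memo i => (mejorB enemigos calcular_muertos i memo).2) PySem.Dict.empty
  let total := (mejorB enemigos calcular_muertos n memo).1.1
  (buildB enemigos calcular_muertos memo n (n : Int) [], total)

-- ===== PRECONDITION & SPEC =====
-- Pre_ excludes exactly the inputs where Python A raises IndexError: calcular_muertos shorter
-- than enemigos (A indexes calcular_muertos[i-1] for every i up to len(enemigos)).
def Pre_rec_oleada (enemigos : List Int) (calcular_muertos : List Int) : Prop :=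
  enemigos.length ≤ calcular_muertos.length
instance (enemigos : List Int) (calcular_muertos : List Int) : Decidable (Pre_rec_oleada enemigos calcular_muertos) := by unfold Pre_rec_oleada; infer_instance
def pvWitness_rec_oleada : List Int × List Int := ([3, 5, 2], [1, 4, 6])

def Spec_rec_oleada (enemigos : List Int) (calcular_muertos : List Int) (out : List String × Int) : Prop := out = rec_oleada_alt enemigos calcular_muertos
instance (enemigos : List Int) (calcular_muertos : List Int) (out : List String × Int) : Decidable (Spec_rec_oleada enemigos calcular_muertos out) := by unfold Spec_rec_oleada; infer_instance

-- ===== CLAIM (what is proved, stated in full; the proofs are below) =====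
def Claim_equal_rec_oleada : Prop := ∀ (enemigos : List Int) (calcular_muertos : List Int), Dom_rec_oleada enemigos calcular_muertos → Pre_rec_oleada enemigos calcular_muertos → Spec_rec_oleada enemigos calcular_muertos (rec_oleada enemigos calcular_muertos)

-- ===== LEMMAS AND PROOFS =====

-- Pure value of `mejor i` / row i of A's table: (best kills on first i waves, split point).
def bestF (e cm : List Int) : Nat → Int × Int
  | 0 => (0, 0)
  | i + 1 =>
    (List.range' 1 i).attach.foldl
      (fun (mp : Int × Int) k =>
        if (bestF e cm k.1).1 + min (cm.getD (i - k.1) 0) (e.getD i 0) > mp.1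
        then ((bestF e cm k.1).1 + min (cm.getD (i - k.1) 0) (e.getD i 0), (k.1 : Int))
        else mp)
      (min (cm.getD i 0) (e.getD i 0), 0)
termination_by i => i
decreasing_by have := (List.mem_range'_1.1 k.2).2; omega

-- memo invariant: every entry is a correct bestF value at a positive index
def GoodM (e cm : List Int) (memo : PySem.Dict Int (Int × Int)) : Prop :=
  ∀ j v, memo.get? j = some v → ∃ m : Nat, j = (m : Int) ∧ v = bestF e cm m

theorem goodM_empty (e cm : List Int) : GoodM e cm PySem.Dict.empty := by
  intro j v h; simp [PySem.Dict.get?_empty] at h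

theorem bestF_succ (e cm : List Int) (i : Nat) :
    bestF e cm (i + 1) = (List.range' 1 i).foldl
      (fun (mp : Int × Int) k =>
        if (bestF e cm k).1 + min (cm.getD (i - k) 0) (e.getD i 0) > mp.1
        then ((bestF e cm k).1 + min (cm.getD (i - k) 0) (e.getD i 0), (k : Int))
        else mp)
      (min (cm.getD i 0) (e.getD i 0), 0) := by
  rw [bestF]
  exact List.foldl_attach (f := fun (mp : Int × Int) k =>
    if (bestF e cm k).1 + min (cm.getD (i - k) 0) (e.getD i 0) > mp.1
    then ((bestF e cm k).1 + min (cm.getD (i - k) 0) (e.getD i 0), (k : Int))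
    else mp)

theorem mejorB_fold_attach (e cm : List Int) (i : Nat) (st0 : (Int × Int) × PySem.Dict Int (Int × Int)) :
    (List.range' 1 i).attach.foldl
      (fun (st : (Int × Int) × PySem.Dict Int (Int × Int)) k =>
        (if (mejorB e cm k.1 st.2).1.1 + min (cm.getD (i - k.1) 0) (e.getD i 0) > st.1.1
         then ((mejorB e cm k.1 st.2).1.1 + min (cm.getD (i - k.1) 0) (e.getD i 0), (k.1 : Int))
         else st.1,
         (mejorB e cm k.1 st.2).2)) st0
    = (List.range' 1 i).foldl
      (fun (st : (Int × Int) × PySem.Dict Int (Int × Int)) k =>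
        (if (mejorB e cm k st.2).1.1 + min (cm.getD (i - k) 0) (e.getD i 0) > st.1.1
         then ((mejorB e cm k st.2).1.1 + min (cm.getD (i - k) 0) (e.getD i 0), (k : Int))
         else st.1,
         (mejorB e cm k st.2).2)) st0 :=
  List.foldl_attach (f := fun (st : (Int × Int) × PySem.Dict Int (Int × Int)) k =>
    (if (mejorB e cm k st.2).1.1 + min (cm.getD (i - k) 0) (e.getD i 0) > st.1.1
     then ((mejorB e cm k st.2).1.1 + min (cm.getD (i - k) 0) (e.getD i 0), (k : Int))
     else st.1,
     (mejorB e cm k st.2).2))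

theorem fold_thread (e cm : List Int) (i : Nat) (l : List Nat)
    (hl : ∀ k ∈ l, ∀ memo, GoodM e cm memo →
      (mejorB e cm k memo).1 = bestF e cm k ∧ GoodM e cm (mejorB e cm k memo).2) :
    ∀ (st : Int × Int) (memo : PySem.Dict Int (Int × Int)), GoodM e cm memo →
    (l.foldl (fun (st : (Int × Int) × PySem.Dict Int (Int × Int)) k =>
        (if (mejorB e cm k st.2).1.1 + min (cm.getD (i - k) 0) (e.getD i 0) > st.1.1
         then ((mejorB e cm k st.2).1.1 + min (cm.getD (i - k) 0) (e.getD i 0), (k : Int))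
         else st.1,
         (mejorB e cm k st.2).2)) (st, memo)).1
      = l.foldl (fun (mp : Int × Int) k =>
          if (bestF e cm k).1 + min (cm.getD (i - k) 0) (e.getD i 0) > mp.1
          then ((bestF e cm k).1 + min (cm.getD (i - k) 0) (e.getD i 0), (k : Int))
          else mp) st
    ∧ GoodM e cm
      (l.foldl (fun (st : (Int × Int) × PySem.Dict Int (Int × Int)) k =>
        (if (mejorB e cm k st.2).1.1 + min (cm.getD (i - k) 0) (e.getD i 0) > st.1.1
         then ((mejorB e cm k st.2).1.1 + min (cm.getD (i - k) 0) (e.getD i 0), (k : Int))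
         else st.1,
         (mejorB e cm k st.2).2)) (st, memo)).2 := by
  induction l with
  | nil => intro st memo hG; exact ⟨rfl, hG⟩
  | cons k l ih =>
    intro st memo hG
    have hk := hl k (List.mem_cons_self) memo hG
    simp only [List.foldl_cons, hk.1]
    exact ih (fun k' hk' => hl k' (List.mem_cons_of_mem _ hk')) _ _ hk.2

theorem mejorB_eq (e cm : List Int) (i : Nat) :
    ∀ (memo : PySem.Dict Int (Int × Int)), GoodM e cm memo →
    (mejorB e cm i memo).1 = bestF e cm i ∧ GoodM e cm (mejorB e cm i memo).2 := by
  induction i using Nat.strong_induction_on with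
  | _ i IH =>
    intro memo hG
    match i with
    | 0 =>
      refine ⟨by simp [mejorB, bestF], ?_⟩
      simp only [mejorB]
      exact hG
    | i + 1 =>
      rw [mejorB]
      cases hget : memo.get? ((i : Int) + 1) with
      | some v =>
        obtain ⟨m, hm, hv⟩ := hG _ _ hget
        have : m = i + 1 := by omega
        subst this
        exact ⟨hv.symm ▸ rfl, hG⟩
      | none =>
        have hthread := fold_thread e cm i (List.range' 1 i)
          (fun k hk memo hGm => IH k (by have := (List.mem_range'_1.1 hk).2; omega) memo hGm)
          (min (cm.getD i 0) (e.getD i 0), 0) memo hG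
        simp only [mejorB_fold_attach]
        refine ⟨by rw [hthread.1, bestF_succ], ?_⟩
        intro j v h
        rw [PySem.Dict.get?_insert] at h
        by_cases hj : j = (i : Int) + 1
        · simp only [if_pos hj] at h
          refine ⟨i + 1, by omega, ?_⟩
          rw [bestF_succ, ← hthread.1]
          exact (Option.some.inj h).symm
        · simp only [if_neg hj] at h
          exact hthread.2 _ _ h
  

-- A's outer loop invariant: after the waves 1..m, both tables hold the bestF values up to m
theorem crearA_inv (e cm : List Int) (m : Nat) (hm : m ≤ e.length) :
    (((List.range' 1 m).foldl (stepA e cm)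
        (List.replicate (e.length + 1) 0, List.replicate (e.length + 1) 0)).1.length = e.length + 1)
    ∧ (((List.range' 1 m).foldl (stepA e cm)
        (List.replicate (e.length + 1) 0, List.replicate (e.length + 1) 0)).2.length = e.length + 1)
    ∧ ∀ j : Nat, j ≤ m →
      (((List.range' 1 m).foldl (stepA e cm)
          (List.replicate (e.length + 1) 0, List.replicate (e.length + 1) 0)).1.getD j 0 = (bestF e cm j).1)
      ∧ (((List.range' 1 m).foldl (stepA e cm)
          (List.replicate (e.length + 1) 0, List.replicate (e.length + 1) 0)).2.getD j 0 = (bestF e cm j).2) := by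
  induction m with
  | zero =>
    refine ⟨by simp, by simp, ?_⟩
    intro j hj
    interval_cases j
    constructor <;> simp [bestF]
  | succ m ih =>
    obtain ⟨hL1, hL2, hIH⟩ := ih (by omega)
    rw [List.range'_1_concat, List.foldl_append, List.foldl_cons, List.foldl_nil,
        Nat.add_comm 1 m]
    set P := (List.range' 1 m).foldl (stepA e cm)
      (List.replicate (e.length + 1) 0, List.replicate (e.length + 1) 0) with hPdef
    have hidx : ∀ k : Nat, m + 1 - k - 1 = m - k := fun k => by omega
    have hst : ((List.range' 1 (m + 1 - 1)).foldl
        (fun (mp : Int × Int) k =>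
          let muertos := P.1.getD k 0 + min (cm.getD (m + 1 - k - 1) 0) (e.getD (m + 1 - 1) 0)
          if muertos > mp.1 then (muertos, (k : Int)) else mp)
        (min (cm.getD (m + 1 - 1) 0) (e.getD (m + 1 - 1) 0), 0)) = bestF e cm (m + 1) := by
      rw [bestF_succ]
      simp only [Nat.add_sub_cancel, hidx]
      refine PySem.List.foldl_congr_mem _ _ _ _ ?_
      intro acc k hk
      have hkm : k ≤ m := by have := (List.mem_range'_1.1 hk).2; omega
      simp only [(hIH k hkm).1]
    simp only [stepA, hst]
    refine ⟨by simpa using hL1, by simpa using hL2, ?_⟩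
    intro j hj
    have hjlen : j < e.length + 1 := by omega
    by_cases hjm : j = m + 1
    · subst hjm
      constructor <;>
        · rw [List.getD_eq_getElem?_getD, List.getElem?_set]
          simp [hL1, hL2, hjlen]
    · have hjm' : j ≤ m := by omega
      refine ⟨?_, ?_⟩ <;>
        rw [List.getD_eq_getElem?_getD, List.getElem?_set, if_neg (by omega),
          ← List.getD_eq_getElem?_getD]
      · exact (hIH j hjm').1
      · exact (hIH j hjm').2
  
-- A's table characterisation
theorem crearA_spec (e cm : List Int) (j : Nat) (hj : j ≤ e.length) :
    (crearA e cm).1.getD j 0 = (bestF e cm j).1 ∧ (crearA e cm).2.getD j 0 = (bestF e cm j).2 :=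
  (crearA_inv e cm e.length le_rfl).2.2 j hj

-- the pure fold keeps its second component in [0, c)
theorem foldPure_snd (e cm : List Int) (i : Nat) (c : Nat) :
    ∀ (l : List Nat), (∀ k ∈ l, k < c) → ∀ st : Int × Int, 0 ≤ st.2 → st.2 < (c : Int) →
    0 ≤ (l.foldl
      (fun (mp : Int × Int) k =>
        if (bestF e cm k).1 + min (cm.getD (i - k) 0) (e.getD i 0) > mp.1
        then ((bestF e cm k).1 + min (cm.getD (i - k) 0) (e.getD i 0), (k : Int))
        else mp) st).2
    ∧ (l.foldl
      (fun (mp : Int × Int) k =>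
        if (bestF e cm k).1 + min (cm.getD (i - k) 0) (e.getD i 0) > mp.1
        then ((bestF e cm k).1 + min (cm.getD (i - k) 0) (e.getD i 0), (k : Int))
        else mp) st).2 < (c : Int) := by
  intro l
  induction l with
  | nil => intro _ st h0 hc; exact ⟨h0, hc⟩
  | cons k l ihl =>
    intro hl st h0 hc
    simp only [List.foldl_cons]
    have hk := hl k (List.mem_cons_self)
    refine ihl (fun k' hk' => hl k' (List.mem_cons_of_mem _ hk')) _ ?_ ?_
    · split_ifs with hif
      · exact Int.natCast_nonneg k
      · exact h0
    · split_ifs with hif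
      · show (k : Int) < (c : Int); exact_mod_cast hk
      · exact hc

-- the stored split point is in [0, i)
theorem bestF_snd_lt (e cm : List Int) (i : Nat) (hi : 1 ≤ i) :
    0 ≤ (bestF e cm i).2 ∧ (bestF e cm i).2 < (i : Int) := by
  match i, hi with
  | m + 1, _ =>
    rw [bestF_succ]
    exact foldPure_snd e cm m (m + 1) (List.range' 1 m)
      (fun k hk => by have := (List.mem_range'_1.1 hk).2; omega)
      (min (cm.getD m 0) (e.getD m 0), 0) le_rfl (by positivity)

theorem buildA_acc (p : List Int) (fuel : Nat) :
    ∀ i acc, buildA p fuel i acc = acc ++ buildA p fuel i [] := by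
  induction fuel with
  | zero => intro i acc; simp [buildA]
  | succ fuel ih =>
    intro i acc
    by_cases h : i > 0
    · simp only [buildA, if_pos h]
      split_ifs with h2 <;> (rw [ih]; conv_rhs => rw [ih]) <;> simp
    · simp [buildA, h]

theorem buildB_acc (e cm : List Int) (memo : PySem.Dict Int (Int × Int)) (fuel : Nat) :
    ∀ i acc, buildB e cm memo fuel i acc = buildB e cm memo fuel i [] ++ acc := by
  induction fuel with
  | zero => intro i acc; simp [buildB]
  | succ fuel ih =>
    intro i acc
    by_cases h : i > 0
    · simp only [buildB, if_pos h]
      rw [ih]; conv_rhs => rw [ih]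
      simp
    · simp [buildB, h]

-- the two reconstruction loops build the same chronological action list
theorem build_eq (e cm : List Int) (prevL : List Int) (memo : PySem.Dict Int (Int × Int))
    (hprev : ∀ j : Nat, 1 ≤ j → j ≤ e.length → prevL.getD j 0 = (bestF e cm j).2)
    (hmemo : GoodM e cm memo) :
    ∀ (fuel : Nat) (i : Int), 0 ≤ i → i.toNat ≤ fuel → i ≤ (e.length : Int) →
    (buildA prevL fuel i []).reverse = buildB e cm memo fuel i [] := by
  intro fuel
  induction fuel with
  | zero => intro i _ _ _; simp [buildA, buildB]
  | succ fuel ih =>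
    intro i h0 hf hlen
    by_cases hi : i > 0
    · simp only [buildA, buildB, if_pos hi]
      have hiN : 1 ≤ i.toNat := by omega
      have hiNe : i.toNat ≤ e.length := by omega
      have hkA : prevL.getD i.toNat 0 = (bestF e cm i.toNat).2 := hprev _ hiN hiNe
      have hkB : (mejorB e cm i.toNat memo).1 = bestF e cm i.toNat := (mejorB_eq e cm i.toNat memo hmemo).1
      have hbnd := bestF_snd_lt e cm i.toNat hiN
      rw [hkA, hkB]
      have hnc : (if i - (bestF e cm i.toNat).2 - 1 < 0 then 0 else i - (bestF e cm i.toNat).2 - 1)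
          = max (i - (bestF e cm i.toNat).2 - 1) 0 := by omega
      rw [hnc]
      rw [buildA_acc, buildB_acc, List.nil_append, List.reverse_append]
      rw [ih _ (by omega) (by omega) (by omega)]
      simp
    · simp [buildA, buildB, hi]

-- ===== VERDICT (by name: the statement is the Claim_ definition above) =====
theorem goodM_warm (e cm : List Int) :
    ∀ (l : List Nat) (memo : PySem.Dict Int (Int × Int)), GoodM e cm memo →
    GoodM e cm (l.foldl (fun memo i => (mejorB e cm i memo).2) memo) := by
  intro l
  induction l with
  | nil => intro memo h; exact h
  | cons k l ihl => intro memo h; exact ihl _ ((mejorB_eq e cm k memo h).2)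

theorem rec_oleada_spec : Claim_equal_rec_oleada := by
  intro e cm _ _
  show rec_oleada e cm = rec_oleada_alt e cm
  have hmemo : GoodM e cm ((List.range' 1 e.length).foldl
      (fun memo i => (mejorB e cm i memo).2) PySem.Dict.empty) :=
    goodM_warm e cm _ _ (goodM_empty e cm)
  have hA := fun (j : Nat) (hj : j ≤ e.length) => crearA_spec e cm j hj
  have hBtot := (mejorB_eq e cm e.length _ hmemo).1
  simp only [rec_oleada, rec_oleada_alt]
  refine Prod.ext ?_ ?_
  · refine build_eq e cm (crearA e cm).2 _ (fun j h1 h2 => (hA j h2).2) hmemo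
      e.length (e.length : Int) (by positivity) (by simp) le_rfl
  · show (crearA e cm).1.getD e.length 0 = (mejorB e cm e.length _).1.1
    rw [(hA e.length le_rfl).1, hBtot]
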